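-- pv_equiv track=rewrite | github.com/mighty834/DigInPython | str_merge.py | strMerge
-- ===== SOURCE A (Python) =====
-- def strMerge(str1, str2):
--     str_result = ""
--     min_length = min(len(str1), len(str2))
--
--     greater_str = ""
--     if (len(str1) > len(str2)):
--         greater_str = str1
--     else:
--         greater_str = str2
--
--     for i in range(0, min_length):
--         str_result += str1[i]
--         str_result += str2[i]
--
--     str_result += greater_str[min_length:]
--
--     return str_result
-- ===== SOURCE B (Python) =====
-- def strMerge(str1, str2):
--     m = min(len(str1), len(str2))
--     longer = str1 if len(str1) > m else str2
--
--     def pick(j):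
--         if j < 2 * m:
--             return (str1 if j % 2 == 0 else str2)[j // 2]
--         return longer[j - m]
--
--     return ''.join(map(pick, range(len(str1) + len(str2))))
-- ===== Notes on version B (the rewrite author's own statement) =====
-- stated objective: alternative
-- what changed: B is output-index driven: it computes each character of the result directly from its position by arithmetic (even/odd positions below 2*m map to str1/str2 at j//2, later positions index the longer string at j-m) instead of A's input-driven accumulation loop plus tail slice.
import Mathlib
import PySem

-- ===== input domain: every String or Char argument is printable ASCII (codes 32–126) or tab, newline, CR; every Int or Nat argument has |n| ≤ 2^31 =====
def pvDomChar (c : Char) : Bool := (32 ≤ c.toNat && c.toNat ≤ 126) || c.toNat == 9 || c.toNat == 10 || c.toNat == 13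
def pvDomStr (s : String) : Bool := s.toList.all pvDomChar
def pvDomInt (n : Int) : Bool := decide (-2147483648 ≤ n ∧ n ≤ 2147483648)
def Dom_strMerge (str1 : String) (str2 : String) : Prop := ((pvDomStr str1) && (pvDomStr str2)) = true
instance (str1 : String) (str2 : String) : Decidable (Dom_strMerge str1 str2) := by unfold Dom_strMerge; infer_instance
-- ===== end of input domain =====

-- B computes each output character directly from its position by arithmetic (output-index driven),
-- replacing A's accumulation loop over input indices plus tail slice; same cost, different algorithm.

-- ===== PORT A =====
-- literal port of A: index loop over range(0, min_length) appending str1[i], str2[i], then greater_str[min_length:]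
def strMerge (str1 : String) (str2 : String) : String :=
  let l1 := str1.toList
  let l2 := str2.toList
  let minLength : Nat := min l1.length l2.length
  let greaterStr : List Char := if l1.length > l2.length then l1 else l2
  let strResult : List Char :=
    (PySem.List.pyRange 0 (minLength : Int) 1).foldl
      (fun acc i => (acc ++ (PySem.List.pyGet? l1 i).toList) ++ (PySem.List.pyGet? l2 i).toList) []
  String.ofList (strResult ++ PySem.List.slice greaterStr (some (minLength : Int)) none)

-- ===== PORT B =====
-- literal port of B: pick(j) chooses the source and index by arithmetic on the output position j;
-- ''.join(map(pick, range(len(str1)+len(str2)))).  The getD default ' ' is unreachable: every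
-- index Python computes here is in range.
def strMerge_alt (str1 : String) (str2 : String) : String :=
  let l1 := str1.toList
  let l2 := str2.toList
  let m := min l1.length l2.length
  let longer := if l1.length > m then l1 else l2
  let pick : Nat → Char := fun j =>
    if j < 2 * m then (if j % 2 == 0 then l1 else l2).getD (j / 2) ' '
    else longer.getD (j - m) ' '
  String.ofList ((List.range (l1.length + l2.length)).map pick)

-- ===== PRECONDITION & SPEC =====
def Spec_strMerge (str1 : String) (str2 : String) (out : String) : Prop := out = strMerge_alt str1 str2
instance (str1 : String) (str2 : String) (out : String) : Decidable (Spec_strMerge str1 str2 out) := by unfold Spec_strMerge; infer_instance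

-- ===== CLAIM (what is proved, stated in full; the proofs are below) =====
def Claim_equal_strMerge : Prop := ∀ (str1 : String) (str2 : String), Dom_strMerge str1 str2 → Spec_strMerge str1 str2 (strMerge str1 str2)

-- ===== LEMMAS AND PROOFS =====

-- A's loop body as a flatMap over the index range
theorem strMerge_loop_flatMap (l1 l2 : List Char) (m : Nat) :
    (PySem.List.pyRange 0 (m : Int) 1).foldl
      (fun acc i => (acc ++ (PySem.List.pyGet? l1 i).toList) ++ (PySem.List.pyGet? l2 i).toList) []
    = (List.range m).flatMap (fun k => (l1[k]?).toList ++ (l2[k]?).toList) := by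
  simp only [List.append_assoc]
  rw [PySem.List.foldl_append_eq_flatMap, PySem.List.pyRange_zero_nat]
  simp [List.flatMap_map, PySem.List.pyGet?_natCast]

-- interleaved prefix: flatMap over input indices = map of the arithmetic pick over output positions < 2n
theorem strMerge_interleave (l1 l2 : List Char) :
    ∀ n, n ≤ l1.length → n ≤ l2.length →
    (List.range n).flatMap (fun k => (l1[k]?).toList ++ (l2[k]?).toList)
    = (List.range (2 * n)).map
        (fun j => (if j % 2 == 0 then l1 else l2).getD (j / 2) ' ') := by
  intro n
  induction n with
  | zero => simp
  | succ k ih =>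
    intro h1 h2
    have e2 : 2 * (k + 1) = (2 * k + 1) + 1 := by omega
    rw [List.range_succ, e2, List.range_succ, List.range_succ]
    simp only [List.flatMap_append, List.map_append,
      ih (by omega) (by omega), List.flatMap_cons, List.flatMap_nil, List.map_cons,
      List.map_nil, List.append_assoc]
    congr 1
    rw [show (2 * k) % 2 = 0 from by omega, show (2 * k + 1) % 2 = 1 from by omega,
      show (2 * k) / 2 = k from by omega, show (2 * k + 1) / 2 = k from by omega]
    simp [(by omega : k < l1.length), (by omega : k < l2.length)]

-- tail: drop = map of positional reads
theorem strMerge_tail (l : List Char) (i : Nat) (hi : i ≤ l.length) :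
    l.drop i = (List.range (l.length - i)).map (fun k => l.getD (i + k) ' ') := by
  apply List.ext_getElem
  · simp
  · intro j h1 h2
    simp only [List.getElem_drop, List.getElem_map, List.getElem_range]
    rw [List.getD_eq_getElem _ _ (by simp at h1; omega)]

-- ===== VERDICT (by name: the statement is the Claim_ definition above) =====
theorem strMerge_spec : Claim_equal_strMerge := by
  intro str1 str2 _
  unfold Spec_strMerge strMerge strMerge_alt
  simp only
  rw [strMerge_loop_flatMap, PySem.List.slice_from _ (Int.natCast_nonneg _)]
  simp only [Int.toNat_natCast]
  apply congrArg String.ofList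
  set l1 := str1.toList
  set l2 := str2.toList
  set m := min l1.length l2.length with hm
  set longer := if l1.length > m then l1 else l2 with hlonger
  have hgt : (if l1.length > l2.length then l1 else l2) = longer := by
    rw [hlonger, hm]; by_cases h : l2.length < l1.length
    · have h2 : min l1.length l2.length < l1.length := by omega
      simp [h, h2]
    · have h2 : ¬ (min l1.length l2.length < l1.length) := by omega
      simp [h, h2]
  have hlen : longer.length = l1.length + l2.length - m := by
    rw [hlonger]; by_cases h : l1.length > m <;> simp [h] <;> omega
  have hmle : m ≤ longer.length := by omega
  have htot : l1.length + l2.length = 2 * m + (longer.length - m) := by omega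
  rw [hgt,
    strMerge_interleave l1 l2 m (Nat.min_le_left _ _) (Nat.min_le_right _ _),
    strMerge_tail longer m hmle, htot, List.range_add, List.map_append, List.map_map]
  congr 1
  · apply List.map_congr_left
    intro j hj
    simp only [List.mem_range] at hj
    simp [hj]
  · apply List.map_congr_left
    intro k _
    have : ¬ (2 * m + k < 2 * m) := by omega
    simp only [Function.comp_apply, this, if_false]
    congr 1
    omega
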